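-- pv_equiv track=rewrite | github.com/shu120/Competitive_Programing | ABC/442/f.py | makecost
-- ===== SOURCE A (Python) =====
-- def makecost(row, N):
-- 	pref = [0] * (N + 1)
-- 	for j in range(N):
-- 		pref[j + 1] = pref[j] + (row[j] == '#')
-- 	total = pref[N]
--
-- 	cost = [0] * (N + 1)
-- 	for k in range(N + 1):
-- 		hash_prefix = pref[k]
-- 		hash_suffix = total - pref[k]
-- 		dot_suffix = (N - k) - hash_suffix
-- 		cost[k] = hash_prefix + dot_suffix
-- 	return cost
-- ===== SOURCE B (Python) =====
-- def makecost(row, N):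
--     # running-recurrence version: start from the dot-count of the whole prefix,
--     # then adjust by +/-1 per position; no prefix-sum table.
--     c = sum(1 for ch in row[:N] if ch != '#')
--     out = [c]
--     for j in range(N):
--         c += 1 if row[j] == '#' else -1
--         out.append(c)
--     return out
-- ===== Notes on version B (the rewrite author's own statement) =====
-- stated objective: simpler
-- what changed: Replaces the prefix-sum table plus second index loop over two preallocated arrays by a single running accumulator (cost[k+1] = cost[k] +/- 1) appended to the output in one pass.
import Mathlib
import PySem

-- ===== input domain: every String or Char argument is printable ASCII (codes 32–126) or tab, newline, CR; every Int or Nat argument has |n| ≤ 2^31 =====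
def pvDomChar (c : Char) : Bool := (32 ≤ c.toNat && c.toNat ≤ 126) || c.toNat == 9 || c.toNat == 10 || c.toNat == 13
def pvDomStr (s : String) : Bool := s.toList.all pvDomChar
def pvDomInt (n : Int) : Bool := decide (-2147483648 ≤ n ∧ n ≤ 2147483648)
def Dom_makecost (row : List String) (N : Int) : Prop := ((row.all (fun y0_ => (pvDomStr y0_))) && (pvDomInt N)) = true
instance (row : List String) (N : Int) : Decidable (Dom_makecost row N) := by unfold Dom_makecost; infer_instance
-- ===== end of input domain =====

-- B replaces A's prefix-sum table and index-assignment loops by a single running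
-- accumulator appended in one pass (objective: simpler; same O(N) cost).


-- ===== PORT A =====
def makecost (row : List String) (N : Int) : List Int :=
  let pref := (PySem.List.pyRange 0 N 1).foldl
    (fun pref j =>
      PySem.List.pySetD pref (j + 1)
        (PySem.List.pyGetD pref j 0 + (if PySem.List.pyGetD row j "" = "#" then 1 else 0)))
    (PySem.List.pyRepeat [(0 : Int)] (N + 1))
  let total := PySem.List.pyGetD pref N 0
  (PySem.List.pyRange 0 (N + 1) 1).foldl
    (fun cost k =>
      let hash_prefix := PySem.List.pyGetD pref k 0
      let hash_suffix := total - hash_prefix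
      let dot_suffix := (N - k) - hash_suffix
      PySem.List.pySetD cost k (hash_prefix + dot_suffix))
    (PySem.List.pyRepeat [(0 : Int)] (N + 1))

-- ===== PORT B =====
def makecost_alt (row : List String) (N : Int) : List Int :=
  let c0 : Int := ((PySem.List.slice row none (some N)).countP (fun s => !(s == "#")) : Nat)
  ((PySem.List.pyRange 0 N 1).foldl
    (fun (st : Int × List Int) j =>
      let c := st.1 + (if PySem.List.pyGetD row j "" = "#" then 1 else -1)
      (c, st.2 ++ [c]))
    (c0, [c0])).2

-- ===== PRECONDITION & SPEC =====
-- A raises IndexError when N < 0 (pref[N] on an empty table) or N > len(row) (row[j]);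
-- Pre_ excludes exactly those crashing inputs.
def Pre_makecost (row : List String) (N : Int) : Prop := 0 ≤ N ∧ N ≤ (row.length : Int)
instance (row : List String) (N : Int) : Decidable (Pre_makecost row N) := by unfold Pre_makecost; infer_instance
def pvWitness_makecost : List String × Int := (["#", ".", "#"], 2)
def Spec_makecost (row : List String) (N : Int) (out : List Int) : Prop := out = makecost_alt row N
instance (row : List String) (N : Int) (out : List Int) : Decidable (Spec_makecost row N out) := by unfold Spec_makecost; infer_instance

-- ===== CLAIM (what is proved, stated in full; the proofs are below) =====
def Claim_equal_makecost : Prop := ∀ (row : List String) (N : Int), Dom_makecost row N → Pre_makecost row N → Spec_makecost row N (makecost row N)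

-- ===== LEMMAS AND PROOFS =====

-- number of '#' among the first k entries of row
def pvHp (row : List String) (k : Nat) : Int := ((row.take k).countP (fun s => s == "#") : Nat)

theorem pvHp_succ (row : List String) (m : Nat) (hm : m < row.length) :
    pvHp row (m + 1) = pvHp row m + (if row.getD m "" = "#" then 1 else 0) := by
  unfold pvHp
  rw [List.take_add_one, List.countP_append]
  have h1 : row[m]? = some row[m] := List.getElem?_eq_getElem hm
  have h2 : row.getD m "" = row[m] := by simp [List.getD, h1]
  rw [h1, h2]
  by_cases h : row[m] = "#" <;> simp [h]

theorem pvPrefA (row : List String) (n : Nat) (hn : n ≤ row.length) :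
    ∀ m : Nat, m ≤ n →
    (PySem.List.pyRange 0 (m : Int) 1).foldl
      (fun pref j =>
        PySem.List.pySetD pref (j + 1)
          (PySem.List.pyGetD pref j 0 + (if PySem.List.pyGetD row j "" = "#" then 1 else 0)))
      (List.replicate (n + 1) 0)
    = (List.range (m + 1)).map (pvHp row) ++ List.replicate (n - m) 0 := by
  intro m hm
  induction m with
  | zero => simp [PySem.List.pyRange_one_eq_nil, pvHp, List.replicate_succ]
  | succ m ih =>
    have hm' : m ≤ n := Nat.le_of_succ_le hm
    have hrange : PySem.List.pyRange 0 ((m + 1 : Nat) : Int) 1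
        = PySem.List.pyRange 0 (m : Int) 1 ++ [(m : Int)] := by
      push_cast
      exact PySem.List.pyRange_one_succ_right (by positivity)
    rw [hrange, List.foldl_append, ih hm']
    simp only [List.foldl_cons, List.foldl_nil]
    have hcast : ((m : Int) + 1) = ((m + 1 : Nat) : Int) := by push_cast; ring
    rw [hcast, PySem.List.pySetD_natCast, PySem.List.pyGetD_natCast, PySem.List.pyGetD_natCast]
    have hget : ((List.range (m + 1)).map (pvHp row) ++ List.replicate (n - m) 0).getD m 0
        = pvHp row m := by
      rw [List.getD_eq_getElem?_getD, List.getElem?_append_left (by simp)]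
      simp
    have hrep : List.replicate (n - m) (0 : Int) = 0 :: List.replicate (n - (m + 1)) 0 := by
      have : n - m = (n - (m + 1)) + 1 := by omega
      rw [this, List.replicate_succ]
    have hv : pvHp row m + (if row.getD m "" = "#" then (1 : Int) else 0) = pvHp row (m + 1) :=
      (pvHp_succ row m (by omega)).symm
    rw [hget, List.set_append, hrep]
    simp only [List.length_map, List.length_range, Nat.lt_irrefl, if_false, Nat.sub_self,
      List.set_cons_zero]
    rw [hv]
    simp [List.range_succ]

theorem pvCostA (n : Nat) (g : Nat → Int)
    (pref : List Int) (total : Int)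
    (hg : ∀ k : Nat, k ≤ n →
      g k = PySem.List.pyGetD pref (k : Int) 0
        + (((n : Int) - (k : Int)) - (total - PySem.List.pyGetD pref (k : Int) 0))) :
    ∀ m : Nat, m ≤ n + 1 →
    (PySem.List.pyRange 0 (m : Int) 1).foldl
      (fun cost k =>
        PySem.List.pySetD cost k
          (PySem.List.pyGetD pref k 0 + (((n : Int) - k) - (total - PySem.List.pyGetD pref k 0))))
      (List.replicate (n + 1) 0)
    = (List.range m).map g ++ List.replicate (n + 1 - m) 0 := by
  intro m hm
  induction m with
  | zero => simp [PySem.List.pyRange_one_eq_nil]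
  | succ m ih =>
    have hm' : m ≤ n + 1 := Nat.le_of_succ_le hm
    have hrange : PySem.List.pyRange 0 ((m + 1 : Nat) : Int) 1
        = PySem.List.pyRange 0 (m : Int) 1 ++ [(m : Int)] := by
      push_cast
      exact PySem.List.pyRange_one_succ_right (by positivity)
    rw [hrange, List.foldl_append, ih hm']
    simp only [List.foldl_cons, List.foldl_nil]
    rw [PySem.List.pySetD_natCast]
    have hrep : List.replicate (n + 1 - m) (0 : Int) = 0 :: List.replicate (n + 1 - (m + 1)) 0 := by
      have : n + 1 - m = (n + 1 - (m + 1)) + 1 := by omega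
      rw [this, List.replicate_succ]
    rw [hrep, List.set_append]
    simp only [List.length_map, List.length_range, Nat.lt_irrefl, if_false, Nat.sub_self,
      List.set_cons_zero]
    rw [← hg m (by omega)]
    simp [List.range_succ]

theorem pvAltLoop (row : List String) (n : Nat) (hn : n ≤ row.length) (c0 : Int) :
    ∀ m : Nat, m ≤ n →
    (PySem.List.pyRange 0 (m : Int) 1).foldl
      (fun (st : Int × List Int) j =>
        (st.1 + (if PySem.List.pyGetD row j "" = "#" then 1 else -1),
         st.2 ++ [st.1 + (if PySem.List.pyGetD row j "" = "#" then 1 else -1)]))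
      (c0, [c0])
    = (c0 + 2 * pvHp row m - m,
       (List.range (m + 1)).map (fun k => c0 + 2 * pvHp row k - k)) := by
  intro m hm
  induction m with
  | zero => simp [PySem.List.pyRange_one_eq_nil, pvHp]
  | succ m ih =>
    have hm' : m ≤ n := Nat.le_of_succ_le hm
    have hrange : PySem.List.pyRange 0 ((m + 1 : Nat) : Int) 1
        = PySem.List.pyRange 0 (m : Int) 1 ++ [(m : Int)] := by
      push_cast
      exact PySem.List.pyRange_one_succ_right (by positivity)
    rw [hrange, List.foldl_append, ih hm']
    simp only [List.foldl_cons, List.foldl_nil]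
    rw [PySem.List.pyGetD_natCast]
    have hstep : c0 + 2 * pvHp row m - (m : Int)
        + (if row.getD m "" = "#" then 1 else -1)
        = c0 + 2 * pvHp row (m + 1) - ((m + 1 : Nat) : Int) := by
      rw [pvHp_succ row m (by omega)]
      by_cases h : row.getD m "" = "#"
      · rw [if_pos h, if_pos h]; push_cast; ring
      · rw [if_neg h, if_neg h]; push_cast; ring
    rw [hstep]
    simp [List.range_succ]

theorem pvC0 (row : List String) (n : Nat) (hn : n ≤ row.length) :
    (((PySem.List.slice row none (some ((n : Nat) : Int))).countP (fun s => !(s == "#")) : Nat) : Int)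
    = (n : Int) - pvHp row n := by
  rw [PySem.List.slice_to_natCast]
  have hlen : (row.take n).length = n := by simp [hn]
  have htot := List.length_eq_countP_add_countP (fun s => s == "#") (l := row.take n)
  simp only [decide_not, Bool.decide_eq_true] at htot
  unfold pvHp
  omega

-- ===== VERDICT (by name: the statement is the Claim_ definition above) =====
theorem makecost_spec : Claim_equal_makecost := by
  intro row N _ hpre
  obtain ⟨h0, hle⟩ := hpre
  set n := N.toNat with hn
  have hN : N = (n : Int) := (Int.toNat_of_nonneg h0).symm
  have hnlen : n ≤ row.length := by omega
  unfold Spec_makecost makecost makecost_alt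
  rw [hN]
  have hrep : PySem.List.pyRepeat [(0 : Int)] (((n + 1 : Nat)) : Int) = List.replicate (n + 1) 0 := by
    simp [PySem.List.pyRepeat_singleton]
  have hpref := pvPrefA row n hnlen n le_rfl
  simp only [Nat.sub_self, List.replicate_zero, List.append_nil] at hpref
  have hcast : ((n : Int) + 1) = ((n + 1 : Nat) : Int) := by push_cast; ring
  simp only [hcast, hrep, hpref]
  set pref := (List.range (n + 1)).map (pvHp row) with hprefdef
  set total := PySem.List.pyGetD pref ((n : Nat) : Int) 0 with htotaldef
  have hgetk : ∀ k : Nat, k ≤ n → PySem.List.pyGetD pref (k : Int) 0 = pvHp row k := by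
    intro k hk
    rw [PySem.List.pyGetD_natCast, hprefdef, List.getD_eq_getElem?_getD]
    simp [List.getElem?_range (by omega : k < n + 1)]
  have hA := pvCostA n
      (fun k => pvHp row k + (((n : Int) - (k : Int)) - (total - pvHp row k)))
      pref total
      (by intro k hk; rw [hgetk k hk]) (n + 1) le_rfl
  simp only [Nat.sub_self, List.replicate_zero, List.append_nil] at hA
  rw [hA]
  have hB := pvAltLoop row n hnlen
      (((PySem.List.slice row none (some ((n : Nat) : Int))).countP (fun s => !(s == "#")) : Nat))
      n le_rfl
  rw [hB]
  dsimp only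
  have htotal : total = pvHp row n := hgetk n le_rfl
  apply List.map_congr_left
  intro k hk
  rw [htotal, pvC0 row n hnlen]
  ring
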